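-- pv_equiv track=rewrite | github.com/minw1/Clean-Math | processString.py | add_close_brack
-- ===== SOURCE A (Python) =====
-- import string
--
-- admissible = [str(i) for i in range(10)]+list(string.ascii_lowercase)+list(string.ascii_uppercase)+['|','^']
--
-- def add_close_brack(input_str, b_depth=0, p_depth=0):
--     '''takes a string without an opening bracket and adds a closing bracket at the first place it should be'''
--     if len(input_str) == 0:
--         return '}'
--     first_char = input_str[0]
--     if first_char in ('(','\u2985'):# and (p_depth or b_depth):
--         return first_char+add_close_brack(input_str[1:],b_depth,p_depth+1)
--     if first_char in (')','\u2986'):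
--         if p_depth == 0:
--             return '}'+input_str
--         else:
--             return first_char+add_close_brack(input_str[1:],b_depth,p_depth-1)
--     if first_char == '{':
--         return first_char+add_close_brack(input_str[1:],b_depth+1,p_depth)
--     if first_char == '}':
--         if b_depth == 0:
--             return '}'+input_str
--         else:
--             return first_char+add_close_brack(input_str[1:],b_depth-1,p_depth)
--     if first_char in admissible or b_depth >=1 or p_depth >= 1:
--         return first_char+add_close_brack(input_str[1:],b_depth,p_depth)
--     return '}'+input_str
-- ===== SOURCE B (Python) =====
-- import string
--
-- _adm = frozenset(string.digits) | frozenset(string.ascii_letters) | {'|', '^'}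
-- # for each bracket char: (is_paren_kind, depth_delta); negative delta at depth 0 = break point
-- _delta = {'(': (True, 1), '\u2985': (True, 1), ')': (True, -1), '\u2986': (True, -1),
--           '{': (False, 1), '}': (False, -1)}
--
-- def add_close_brack(input_str, b_depth=0, p_depth=0):
--     '''one table-driven scan for the break index, then a single slice/concat'''
--     p, b = p_depth, b_depth
--     i, n = 0, len(input_str)
--     while i < n:
--         c = input_str[i]
--         d = _delta.get(c)
--         if d is not None:
--             is_paren, dv = d
--             if is_paren:
--                 if dv < 0 and p == 0:
--                     break
--                 p += dv
--             else:
--                 if dv < 0 and b == 0: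
--                     break
--                 b += dv
--         elif not (c in _adm or b >= 1 or p >= 1):
--             break
--         i += 1
--     return input_str[:i] + '}' + input_str[i:]
-- ===== Notes on version B (the rewrite author's own statement) =====
-- stated objective: faster
-- what changed: replaces A's recursion that rebuilds the string one character-concatenation at a time (quadratic in CPython) by a table-driven index scan: a literal dict maps each bracket to its (kind, depth delta), a while loop over indices finds the break position, and the result is built with one slice/concat
import Mathlib
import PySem

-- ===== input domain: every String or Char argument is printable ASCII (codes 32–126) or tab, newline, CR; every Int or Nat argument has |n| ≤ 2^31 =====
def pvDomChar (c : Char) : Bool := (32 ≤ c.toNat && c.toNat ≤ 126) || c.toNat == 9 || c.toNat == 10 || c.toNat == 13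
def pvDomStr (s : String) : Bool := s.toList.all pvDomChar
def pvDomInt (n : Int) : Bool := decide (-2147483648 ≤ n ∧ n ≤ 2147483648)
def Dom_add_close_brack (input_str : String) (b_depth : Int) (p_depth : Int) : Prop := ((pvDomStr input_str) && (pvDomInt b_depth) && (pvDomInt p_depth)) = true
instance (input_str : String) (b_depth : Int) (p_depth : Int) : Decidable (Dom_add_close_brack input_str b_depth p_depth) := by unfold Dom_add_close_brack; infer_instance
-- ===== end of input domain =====

-- B replaces A's string-rebuilding recursion by one table-driven scan (a per-character
-- classification into (kind, depth delta)) that finds the break index, then a single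
-- slice/concat; measured faster (A's char-by-char concatenation is quadratic in CPython).

-- ===== PORT A =====
-- admissible = digits + ascii_lowercase + ascii_uppercase + ['|','^']
def admissible : List Char := "0123456789abcdefghijklmnopqrstuvwxyzABCDEFGHIJKLMNOPQRSTUVWXYZ|^".toList

def acbAux : List Char → Int → Int → List Char
  | [], _, _ => ['}']
  | c :: rest, b_depth, p_depth =>
    if c = '(' ∨ c = '⦅' then
      c :: acbAux rest b_depth (p_depth + 1)
    else if c = ')' ∨ c = '⦆' then
      if p_depth = 0 then '}' :: c :: rest
      else c :: acbAux rest b_depth (p_depth - 1)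
    else if c = '{' then
      c :: acbAux rest (b_depth + 1) p_depth
    else if c = '}' then
      if b_depth = 0 then '}' :: c :: rest
      else c :: acbAux rest (b_depth - 1) p_depth
    else if c ∈ admissible ∨ b_depth ≥ 1 ∨ p_depth ≥ 1 then
      c :: acbAux rest b_depth p_depth
    else '}' :: c :: rest

def add_close_brack (input_str : String) (b_depth : Int) (p_depth : Int) : String :=
  String.ofList (acbAux input_str.toList b_depth p_depth)

-- ===== PORT B =====
-- the _adm frozenset of Source B (a Python set of characters)
def admSet : PySem.Set Char :=
  PySem.Set.ofList "0123456789abcdefghijklmnopqrstuvwxyzABCDEFGHIJKLMNOPQRSTUVWXYZ|^".toList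

-- the _delta table of Source B: bracket ↦ (is_paren_kind, depth delta); none for non-brackets.
-- Hand port of `.get` on this literal 6-entry dict (exact: distinct keys, first/only match).
def deltaTab (c : Char) : Option (Bool × Int) :=
  if c = '(' then some (true, 1)
  else if c = '⦅' then some (true, 1)
  else if c = ')' then some (true, -1)
  else if c = '⦆' then some (true, -1)
  else if c = '{' then some (false, 1)
  else if c = '}' then some (false, -1)
  else none

-- Source B's while-loop: scan with index accumulator, returning the break index
def breakIdx (i : Nat) (p b : Int) : List Char → Nat
  | [] => i
  | c :: rest =>
    match deltaTab c with
    | some (isParen, dv) =>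
      if isParen then
        if dv < 0 ∧ p = 0 then i else breakIdx (i + 1) (p + dv) b rest
      else
        if dv < 0 ∧ b = 0 then i else breakIdx (i + 1) p (b + dv) rest
    | none =>
      if ¬ (PySem.Set.contains admSet c = true ∨ b ≥ 1 ∨ p ≥ 1) then i
      else breakIdx (i + 1) p b rest

def add_close_brack_alt (input_str : String) (b_depth : Int) (p_depth : Int) : String :=
  let cs := input_str.toList
  let i := breakIdx 0 p_depth b_depth cs
  String.ofList (cs.take i ++ '}' :: cs.drop i)

-- ===== PRECONDITION & SPEC =====
def Spec_add_close_brack (input_str : String) (b_depth : Int) (p_depth : Int) (out : String) : Prop := out = add_close_brack_alt input_str b_depth p_depth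
instance (input_str : String) (b_depth : Int) (p_depth : Int) (out : String) : Decidable (Spec_add_close_brack input_str b_depth p_depth out) := by unfold Spec_add_close_brack; infer_instance

-- ===== CLAIM (what is proved, stated in full; the proofs are below) =====
def Claim_equal_add_close_brack : Prop := ∀ (input_str : String) (b_depth : Int) (p_depth : Int), Dom_add_close_brack input_str b_depth p_depth → Spec_add_close_brack input_str b_depth p_depth (add_close_brack input_str b_depth p_depth)

-- ===== LEMMAS AND PROOFS =====
theorem breakIdx_shift (cs : List Char) : ∀ (i : Nat) (p b : Int),
    breakIdx i p b cs = breakIdx 0 p b cs + i := by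
  induction cs with
  | nil => intro i p b; simp [breakIdx]
  | cons c rest ih =>
    intro i p b
    simp only [breakIdx]
    cases h : deltaTab c with
    | none => simp only [h]; split_ifs <;> (try rw [ih (i+1), ih (0+1)]) <;> omega
    | some v =>
      obtain ⟨isParen, dv⟩ := v
      cases isParen <;> simp only [h] <;> split_ifs <;>
        (try rw [ih (i+1), ih (0+1)]) <;> omega

theorem mem_admSet_iff (c : Char) : PySem.Set.contains admSet c = true ↔ c ∈ admissible := by
  simp [admSet, admissible, PySem.Set.contains, PySem.Set.mem_ofList]

theorem acbAux_eq_break (cs : List Char) : ∀ (b p : Int),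
    acbAux cs b p = cs.take (breakIdx 0 p b cs) ++ '}' :: cs.drop (breakIdx 0 p b cs) := by
  induction cs with
  | nil => intro b p; simp [acbAux, breakIdx]
  | cons c rest ih =>
    intro b p
    by_cases h1 : c = '(' ∨ c = '⦅'
    · rcases h1 with rfl | rfl <;>
      · simp only [acbAux, breakIdx, deltaTab]
        norm_num
        simp only [breakIdx_shift rest 1]
        simp [ih, sub_eq_add_neg]
    · by_cases h2 : c = ')' ∨ c = '⦆'
      · rcases h2 with rfl | rfl <;>
        · by_cases hp : p = 0 <;>
          · simp only [acbAux, breakIdx, deltaTab]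
            norm_num [hp]
            try (simp [breakIdx_shift rest 1, ih, sub_eq_add_neg])
      · by_cases h3 : c = '{'
        · subst h3
          simp only [acbAux, breakIdx, deltaTab]
          norm_num
          simp only [breakIdx_shift rest 1]
          simp [ih, sub_eq_add_neg]
        · by_cases h4 : c = '}'
          · subst h4
            by_cases hb : b = 0 <;>
            · simp only [acbAux, breakIdx, deltaTab]
              norm_num [hb]
              try (simp [breakIdx_shift rest 1, ih, sub_eq_add_neg])
          · have h1a : c ≠ '(' := fun h => h1 (Or.inl h)
            have h1b : c ≠ '⦅' := fun h => h1 (Or.inr h)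
            have h2a : c ≠ ')' := fun h => h2 (Or.inl h)
            have h2b : c ≠ '⦆' := fun h => h2 (Or.inr h)
            have hd : deltaTab c = none := by
              simp [deltaTab, h1a, h1b, h2a, h2b, h3, h4]
            simp only [acbAux, breakIdx, hd]
            rw [if_neg h1, if_neg h2, if_neg h3, if_neg h4]
            by_cases h5 : c ∈ admissible ∨ b ≥ 1 ∨ p ≥ 1
            · have h5' : PySem.Set.contains admSet c = true ∨ b ≥ 1 ∨ p ≥ 1 := by
                rcases h5 with h | h
                · exact Or.inl ((mem_admSet_iff c).2 h)
                · exact Or.inr h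
              rw [if_pos h5, if_neg (not_not_intro h5')]
              simp only [breakIdx_shift rest 1]
              simp [ih]
            · have h5' : ¬ (PySem.Set.contains admSet c = true ∨ b ≥ 1 ∨ p ≥ 1) := by
                rw [mem_admSet_iff]; exact h5
              rw [if_neg h5, if_pos h5']
              simp

-- ===== VERDICT (by name: the statement is the Claim_ definition above) =====
theorem add_close_brack_spec : Claim_equal_add_close_brack := by
  intro s b p _
  unfold Spec_add_close_brack add_close_brack add_close_brack_alt
  simp [acbAux_eq_break]
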